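-- pv_equiv track=rewrite | github.com/Drogalion01/Codes-of-lifetime | _find_real_mismatch.py | your_logic
-- ===== SOURCE A (Python) =====
-- def your_logic(n,h,k,a):
--     tmp=[(0,0)]*n
--     for i in range(n):
--         mx=max(a[i:])
--         idx=i+a[i:].index(mx)
--         tmp[i]=(mx,idx)
--     s=sum(a)
--     cy=h//s
--     t=cy*n+max(0,cy-1)*k
--     if h%s==0:
--         return t
--     else:
--         if cy>0:
--             t+=k
--         rem=h%s
--         for i in range(n):
--             if tmp[i][0]>=rem:
--                 t+=1
--                 return t
--             else:
--                 rem-=a[i]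
--                 t+=1
--     return t
-- ===== SOURCE B (Python) =====
-- def your_logic(n, h, k, a):
--     # suffix maxima of a in one right-to-left pass (A recomputes max(a[i:]) per i)
--     suf = [0] * len(a)
--     m = None
--     for i in range(len(a) - 1, -1, -1):
--         m = a[i] if m is None or a[i] > m else m
--         suf[i] = m
--     s = sum(a)
--     cy = h // s
--     t = cy * n + max(0, cy - 1) * k
--     rem = h % s
--     if rem == 0:
--         return t
--     if cy > 0:
--         t += k
--     for i in range(n):
--         t += 1
--         if suf[i] >= rem:
--             return t
--         rem -= a[i]
--     return t
-- ===== Notes on version B (the rewrite author's own statement) =====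
-- stated objective: faster
-- what changed: A recomputes max(a[i:]) (and its index) with a fresh scan for every i; B computes all suffix maxima in one right-to-left running-max pass and drops the unused index computation.
import Mathlib
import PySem

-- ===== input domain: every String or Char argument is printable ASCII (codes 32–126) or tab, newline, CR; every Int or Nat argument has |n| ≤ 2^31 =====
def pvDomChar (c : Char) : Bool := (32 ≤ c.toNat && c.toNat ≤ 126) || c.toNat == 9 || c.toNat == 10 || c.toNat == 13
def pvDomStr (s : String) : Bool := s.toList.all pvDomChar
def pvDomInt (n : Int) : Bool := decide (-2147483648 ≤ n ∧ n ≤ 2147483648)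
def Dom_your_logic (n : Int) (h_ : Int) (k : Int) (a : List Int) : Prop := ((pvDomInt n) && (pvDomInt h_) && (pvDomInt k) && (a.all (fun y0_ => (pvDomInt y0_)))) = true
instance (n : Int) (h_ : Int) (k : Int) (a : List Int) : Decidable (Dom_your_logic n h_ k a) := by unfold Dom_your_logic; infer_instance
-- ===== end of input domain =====

-- B replaces A's per-index max(a[i:]) rescans (O(n^2)) by one right-to-left suffix-maximum pass (O(n)); same return value.

-- ===== PORT A =====
-- tmp = [(0,0)]*n ; for i in range(n): tmp[i] = (max(a[i:]), i + a[i:].index(max(a[i:])))  — each slot written once, built as a map over range(n)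
def pvTmpA (n : Int) (a : List Int) : List (Int × Int) :=
  (PySem.List.pyRange 0 n 1).map (fun i =>
    let tail := PySem.List.slice a (some i) none
    let mx := (PySem.List.max? tail (fun x => x)).getD 0
    let idx := i + (((PySem.List.index? tail mx).getD 0 : Nat) : Int)
    (mx, idx))

-- A's second loop: 'for i in range(n): if tmp[i][0] >= rem: t += 1; return t; else: rem -= a[i]; t += 1'
def pvLoopA (a : List Int) (tmp : List (Int × Int)) : Nat → Nat → Int → Int → Int
  | 0, _, t, _ => t
  | fuel+1, j, t, rem =>
    if (PySem.List.pyGetD tmp ((j : Nat) : Int) (0, 0)).1 ≥ rem then t + 1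
    else pvLoopA a tmp fuel (j+1) (t+1) (rem - PySem.List.pyGetD a ((j : Nat) : Int) 0)

def your_logic (n : Int) (h_ : Int) (k : Int) (a : List Int) : Int :=
  let tmp := pvTmpA n a
  let s := a.sum
  let cy := PySem.Int.floordiv h_ s
  let t := cy * n + max 0 (cy - 1) * k
  if PySem.Int.mod h_ s = 0 then t
  else
    let t := if cy > 0 then t + k else t
    pvLoopA a tmp n.toNat 0 t (PySem.Int.mod h_ s)

-- ===== PORT B =====
-- suffix maxima in one right-to-left pass (B's 'for i in range(len(a)-1, -1, -1)' running-max loop)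
def pvSufMax : List Int → List Int
  | [] => []
  | x :: rest =>
    match pvSufMax rest with
    | [] => [x]
    | m :: ms => max x m :: m :: ms

-- B's final loop: 'for i in range(n): t += 1; if suf[i] >= rem: return t; rem -= a[i]'
def pvLoopB (a suf : List Int) : Nat → Nat → Int → Int → Int
  | 0, _, t, _ => t
  | fuel+1, j, t, rem =>
    let t' := t + 1
    if PySem.List.pyGetD suf ((j : Nat) : Int) 0 ≥ rem then t'
    else pvLoopB a suf fuel (j+1) t' (rem - PySem.List.pyGetD a ((j : Nat) : Int) 0)

def your_logic_alt (n : Int) (h_ : Int) (k : Int) (a : List Int) : Int :=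
  let suf := pvSufMax a
  let s := a.sum
  let cy := PySem.Int.floordiv h_ s
  let t := cy * n + max 0 (cy - 1) * k
  let rem := PySem.Int.mod h_ s
  if rem = 0 then t
  else
    let t := if cy > 0 then t + k else t
    pvLoopB a suf n.toNat 0 t rem

-- ===== PRECONDITION & SPEC =====
-- A raises ZeroDivisionError when sum(a) == 0 and ValueError (max of empty slice) when n > len(a); exactly those are excluded.
def Pre_your_logic (n : Int) (h_ : Int) (k : Int) (a : List Int) : Prop :=
  a.sum ≠ 0 ∧ n ≤ (a.length : Int)
instance (n : Int) (h_ : Int) (k : Int) (a : List Int) : Decidable (Pre_your_logic n h_ k a) := by unfold Pre_your_logic; infer_instance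

def pvWitness_your_logic : Int × Int × Int × List Int := (2, 7, 1, [3, 1])

def Spec_your_logic (n : Int) (h_ : Int) (k : Int) (a : List Int) (out : Int) : Prop := out = your_logic_alt n h_ k a
instance (n : Int) (h_ : Int) (k : Int) (a : List Int) (out : Int) : Decidable (Spec_your_logic n h_ k a out) := by unfold Spec_your_logic; infer_instance

-- ===== CLAIM (what is proved, stated in full; the proofs are below) =====
def Claim_equal_your_logic : Prop := ∀ (n : Int) (h_ : Int) (k : Int) (a : List Int), Dom_your_logic n h_ k a → Pre_your_logic n h_ k a → Spec_your_logic n h_ k a (your_logic n h_ k a)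

-- ===== LEMMAS AND PROOFS =====

-- Python's max(x::u) as a running fold
def pvSMax : List Int → Int
  | [] => 0
  | x :: u => u.foldl max x

theorem pv_foldl_max_pull (u : List Int) (x y : Int) :
    u.foldl max (max x y) = max x (u.foldl max y) := by
  induction u generalizing y with
  | nil => rfl
  | cons z u ih => simp only [List.foldl_cons, max_assoc]; exact ih _

theorem pvSufMax_cons (x : Int) (t : List Int) :
    pvSufMax (x :: t) = t.foldl max x :: pvSufMax t := by
  induction t generalizing x with
  | nil => rfl
  | cons y u ih =>
    show (match pvSufMax (y :: u) with
      | [] => [x]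
      | m :: ms => max x m :: m :: ms) = _
    rw [ih y]
    simp only [List.foldl_cons]
    rw [← pv_foldl_max_pull]

theorem pvSufMax_getD (a : List Int) (j : Nat) (hj : j < a.length) :
    (pvSufMax a).getD j 0 = pvSMax (a.drop j) := by
  induction a generalizing j with
  | nil => simp at hj
  | cons x t ih =>
    rw [pvSufMax_cons]
    cases j with
    | zero => rfl
    | succ j => exact ih j (by simpa using hj)

theorem pvTmpA_fst (n : Int) (a : List Int) (j : Nat) (hn : (j : Int) < n) (hj : j < a.length) :
    (PySem.List.pyGetD (pvTmpA n a) ((j : Nat) : Int) (0, 0)).1 = pvSMax (a.drop j) := by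
  unfold pvTmpA
  rw [PySem.List.pyGetD_map_pyRange_of_nonneg _ n (j : Int) _ (by positivity) hn]
  simp only [PySem.List.slice_from_natCast]
  rcases hd : a.drop j with _ | ⟨x, u⟩
  · exact absurd (List.drop_eq_nil_iff.mp hd) (by omega)
  · rw [PySem.List.max?_id_cons]
    rfl

theorem pvLoop_eq (n : Int) (a : List Int) (hn : n ≤ (a.length : Int)) :
    ∀ (fuel j : Nat) (t rem : Int), (j : Int) + fuel ≤ n →
      pvLoopA a (pvTmpA n a) fuel j t rem = pvLoopB a (pvSufMax a) fuel j t rem := by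
  intro fuel
  induction fuel with
  | zero => intro j t rem _; rfl
  | succ fuel ih =>
    intro j t rem hbound
    have hjn : (j : Int) < n := by push_cast at hbound ⊢; omega
    have hja : j < a.length := by omega
    show (if (PySem.List.pyGetD (pvTmpA n a) ((j : Nat) : Int) (0, 0)).1 ≥ rem then t + 1
          else pvLoopA a (pvTmpA n a) fuel (j+1) (t+1) (rem - PySem.List.pyGetD a ((j : Nat) : Int) 0)) = _
    rw [pvTmpA_fst n a j hjn hja]
    show _ = (if PySem.List.pyGetD (pvSufMax a) ((j : Nat) : Int) 0 ≥ rem then t + 1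
          else pvLoopB a (pvSufMax a) fuel (j+1) (t+1) (rem - PySem.List.pyGetD a ((j : Nat) : Int) 0))
    simp only [PySem.List.pyGetD_natCast]
    rw [pvSufMax_getD a j hja]
    split
    · rfl
    · exact ih (j+1) (t+1) _ (by push_cast at hbound ⊢; omega)

-- ===== VERDICT (by name: the statement is the Claim_ definition above) =====
theorem your_logic_spec : Claim_equal_your_logic := by
  intro n h_ k a _ hpre
  unfold Spec_your_logic your_logic your_logic_alt
  simp only []
  split
  · rfl
  · by_cases hn : 0 ≤ n
    · exact pvLoop_eq n a hpre.2 n.toNat 0 _ _ (by push_cast; omega)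
    · have : n.toNat = 0 := by omega
      rw [this]; rfl
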